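-- pv_equiv track=rewrite | github.com/YH-edenbro/SSAFY_APS | Stack1_1.py | delete_seq
-- ===== SOURCE A (Python) =====
-- def delete_seq(tx):
--     N = len(tx)
--     top = -1
--     stack = []
--     i = 0
--     while i < N:
--
--         for char in tx:
--             if top == -1:  # 스택이 비어있으면
--                 stack.append(char)
--                 top += 1
--                 i += 1
--             elif char != stack[top]:
--                 stack.append(char)
--                 top += 1
--                 i += 1
--             else:
--                 stack.pop()
--                 top -= 1
--                 i += 1
--
--     return len(stack)
-- ===== SOURCE B (Python) =====
-- def delete_seq(tx):
--     cur = list(tx)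
--     changed = True
--     while changed:
--         changed = False
--         out = []
--         i = 0
--         n = len(cur)
--         while i < n:
--             if i + 1 < n and cur[i] == cur[i + 1]:
--                 i += 2
--                 changed = True
--             else:
--                 out.append(cur[i])
--                 i += 1
--         cur = out
--     return len(cur)
-- ===== Notes on version B (the rewrite author's own statement) =====
-- stated objective: alternative
-- what changed: Replaces the single left-to-right stack pass with repeated whole-sequence sweeps that drop disjoint adjacent equal pairs until a sweep removes nothing; the remaining length is the same irreducible result by confluence of pair cancellation.
import Mathlib
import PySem

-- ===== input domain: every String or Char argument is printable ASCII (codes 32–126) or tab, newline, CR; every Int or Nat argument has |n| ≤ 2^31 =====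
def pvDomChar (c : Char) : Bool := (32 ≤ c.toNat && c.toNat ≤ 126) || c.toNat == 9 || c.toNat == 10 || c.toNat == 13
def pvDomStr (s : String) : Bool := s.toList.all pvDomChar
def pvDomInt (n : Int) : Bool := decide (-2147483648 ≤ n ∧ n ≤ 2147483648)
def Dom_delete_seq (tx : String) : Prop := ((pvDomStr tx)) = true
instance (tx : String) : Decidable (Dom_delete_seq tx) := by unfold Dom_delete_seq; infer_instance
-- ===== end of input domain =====

-- B replaces A's one stack pass by repeated sweeps removing disjoint adjacent equal
-- pairs until a sweep changes nothing (same result; an alternative, not faster).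

-- ===== PORT A =====
-- body of A's inner `for char in tx:` loop; state = (stack, top, i)
def pvAForStep (st : List Char × Int × Int) (char : Char) : List Char × Int × Int :=
  let (stack, top, i) := st
  if top = -1 then (stack ++ [char], top + 1, i + 1)
  else if PySem.List.pyGet? stack top ≠ some char then (stack ++ [char], top + 1, i + 1)
  else (stack.dropLast, top - 1, i + 1)  -- stack.pop() discards the last element

-- the for loop adds exactly tx.length to i (needed for termination of the while loop)
theorem pvAFor_i (l : List Char) : ∀ s t i,
    (l.foldl pvAForStep (s, t, i)).2.2 = i + l.length := by
  induction l with
  | nil => intro s t i; simp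
  | cons c l ih =>
    intro s t i
    simp only [List.foldl_cons, pvAForStep]
    split_ifs <;> simp [ih] <;> omega

-- A's `while i < N:` loop; the extra `0 ≤ i` makes the recursion total (Python's i
-- starts at 0 and only increases, so the guard agrees with `i < N` on every reached state)
def pvAWhile (txl : List Char) (stack : List Char) (top i : Int) : Int :=
  if h : 0 ≤ i ∧ i < (txl.length : Int) then
    -- (h is only needed by the termination proof)
    let r := txl.foldl pvAForStep (stack, top, i)
    pvAWhile txl r.1 r.2.1 r.2.2
  else (stack.length : Int)
termination_by ((txl.length : Int) - i).toNat
decreasing_by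
  simp only [List.foldl_attach]
  rw [pvAFor_i]
  omega

def delete_seq (tx : String) : Int := pvAWhile tx.toList [] (-1) 0

-- ===== PORT B =====
-- one sweep of Source B's inner while loop: drop disjoint adjacent equal pairs,
-- return (out, changed)
def pvSweep : List Char → List Char × Bool
  | [] => ([], false)
  | [a] => ([a], false)
  | a :: b :: rest =>
    if a = b then ((pvSweep rest).1, true)
    else (a :: (pvSweep (b :: rest)).1, (pvSweep (b :: rest)).2)

theorem pvSweep_len_le (l : List Char) : (pvSweep l).1.length ≤ l.length := by
  induction l using pvSweep.induct with
  | case1 => simp [pvSweep]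
  | case2 a => simp [pvSweep]
  | case3 b rest ih => simp only [pvSweep, if_true]; simpa using Nat.le_succ_of_le (Nat.le_succ_of_le ih)
  | case4 a b rest hab ih => simp only [pvSweep, if_neg hab]; simpa using ih

theorem pvSweep_len_lt (l : List Char) (h : (pvSweep l).2 = true) :
    (pvSweep l).1.length < l.length := by
  induction l using pvSweep.induct with
  | case1 => simp [pvSweep] at h
  | case2 a => simp [pvSweep] at h
  | case3 b rest ih =>
    simp only [pvSweep, if_true]
    have := pvSweep_len_le rest
    simp; omega
  | case4 a b rest hab ih =>
    simp only [pvSweep, if_neg hab] at h ⊢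
    have := ih h
    simpa using this

-- Source B's outer `while changed:` loop
def pvLoop (l : List Char) : List Char :=
  if h : (pvSweep l).2 = true then pvLoop (pvSweep l).1 else (pvSweep l).1
termination_by l.length
decreasing_by exact pvSweep_len_lt l h

def delete_seq_alt (tx : String) : Int := ((pvLoop tx.toList).length : Int)

-- ===== PRECONDITION & SPEC =====
def Spec_delete_seq (tx : String) (out : Int) : Prop := out = delete_seq_alt tx
instance (tx : String) (out : Int) : Decidable (Spec_delete_seq tx out) := by unfold Spec_delete_seq; infer_instance

-- ===== CLAIM (what is proved, stated in full; the proofs are below) =====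
def Claim_equal_delete_seq : Prop := ∀ (tx : String), Dom_delete_seq tx → Spec_delete_seq tx (delete_seq tx)

-- ===== LEMMAS AND PROOFS =====

-- the abstract cancellation step on a REVERSED stack
def pvStep (st : List Char) (c : Char) : List Char :=
  match st with
  | [] => [c]
  | h :: t => if h = c then t else c :: h :: t

theorem pvStep_chain {st : List Char} (h : st.IsChain (· ≠ ·)) (c : Char) :
    (pvStep st c).IsChain (· ≠ ·) := by
  match st with
  | [] => simp [pvStep]
  | h' :: t =>
    simp only [pvStep]
    split_ifs with he
    · exact h.tail
    · exact List.isChain_cons_cons.mpr ⟨fun he' => he (Eq.symm he'), h⟩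

theorem pvStep_pair {st : List Char} (h : st.IsChain (· ≠ ·)) (c : Char) :
    pvStep (pvStep st c) c = st := by
  match st with
  | [] => simp [pvStep]
  | h' :: t =>
    simp only [pvStep]
    split_ifs with he
    · subst he
      match t, h with
      | [], _ => simp [pvStep]
      | h2 :: t2, h =>
        have hne : h' ≠ h2 := (List.isChain_cons_cons.mp h).1
        simp only [pvStep, if_neg (fun e => hne (Eq.symm e))]
    · simp [pvStep]

-- one sweep does not change the stack-cancellation result
theorem pvSweep_fold (l : List Char) : ∀ st, st.IsChain (· ≠ ·) →
    List.foldl pvStep st (pvSweep l).1 = List.foldl pvStep st l := by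
  induction l using pvSweep.induct with
  | case1 => intro st _; simp [pvSweep]
  | case2 a => intro st _; simp [pvSweep]
  | case3 b rest ih =>
    intro st hst
    simp only [pvSweep, if_true]
    rw [ih st hst]
    simp only [List.foldl_cons]
    rw [pvStep_pair hst]
  | case4 a b rest hab ih =>
    intro st hst
    simp only [pvSweep, if_neg hab, List.foldl_cons]
    exact ih (pvStep st a) (pvStep_chain hst a)

theorem pvSweep_id (l : List Char) (h : (pvSweep l).2 = false) : (pvSweep l).1 = l := by
  induction l using pvSweep.induct with
  | case1 => simp [pvSweep]
  | case2 a => simp [pvSweep]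
  | case3 b rest ih => simp [pvSweep] at h
  | case4 a b rest hab ih =>
    simp only [pvSweep, if_neg hab] at h ⊢
    rw [ih h]

theorem pvSweep_chain (l : List Char) (h : (pvSweep l).2 = false) :
    l.IsChain (· ≠ ·) := by
  induction l using pvSweep.induct with
  | case1 => simp
  | case2 a => simp
  | case3 b rest ih => simp [pvSweep] at h
  | case4 a b rest hab ih =>
    simp only [pvSweep, if_neg hab] at h
    exact List.isChain_cons_cons.mpr ⟨hab, ih h⟩

theorem pvLoop_fold (l : List Char) :
    List.foldl pvStep [] (pvLoop l) = List.foldl pvStep [] l := by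
  induction l using pvLoop.induct with
  | case1 l h ih =>
    rw [pvLoop, dif_pos h, ih, pvSweep_fold l [] (by simp)]
  | case2 l h =>
    rw [pvLoop, dif_neg h, pvSweep_fold l [] (by simp)]

theorem pvLoop_chain (l : List Char) : (pvLoop l).IsChain (· ≠ ·) := by
  induction l using pvLoop.induct with
  | case1 l h ih => rw [pvLoop, dif_pos h]; exact ih
  | case2 l h =>
    rw [pvLoop, dif_neg h]
    rw [pvSweep_id l (by simpa using h)]
    exact pvSweep_chain l (by simpa using h)

theorem pvChain_fold (l : List Char) : ∀ c t, (c :: l).IsChain (· ≠ ·) →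
    List.foldl pvStep (c :: t) l = l.reverse ++ c :: t := by
  induction l with
  | nil => intro c t _; simp
  | cons d l ih =>
    intro c t h
    have hcd : c ≠ d := (List.isChain_cons_cons.mp h).1
    simp only [List.foldl_cons, pvStep, if_neg hcd]
    rw [ih d (c :: t) (List.isChain_cons_cons.mp h).2]
    simp

theorem pvFold_of_chain (l : List Char) (h : l.IsChain (· ≠ ·)) :
    List.foldl pvStep [] l = l.reverse := by
  match l with
  | [] => simp
  | c :: l' =>
    simp only [List.foldl_cons, pvStep]
    rw [pvChain_fold l' c [] h]
    simp

-- A's for-loop body simulates one abstract reversed-stack step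
theorem pvAStep_sim (rs : List Char) (i : Int) (c : Char) :
    pvAForStep (rs.reverse, (rs.length : Int) - 1, i) c
      = ((pvStep rs c).reverse, ((pvStep rs c).length : Int) - 1, i + 1) := by
  match rs with
  | [] => norm_num [pvAForStep, pvStep]
  | h :: t =>
    have hget : PySem.List.pyGet? ((h :: t).reverse) (((h :: t).length : Int) - 1)
        = some h := by
      have he : (h :: t).reverse = t.reverse ++ h :: [] := by simp
      rw [he, show (((h :: t).length : Int) - 1) = ((t.reverse.length : Nat) : Int) by simp]
      exact PySem.List.pyGet?_append_length _ _ _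
    by_cases hc : h = c
    · subst hc
      simp only [pvAForStep, hget, pvStep, if_pos rfl]
      rw [if_neg (by simp), if_neg (by simp)]
      have : (h :: t).reverse.dropLast = t.reverse := by
        rw [show (h :: t).reverse = t.reverse ++ [h] by simp, List.dropLast_concat]
      simp only [this, List.length_cons]
      refine Prod.ext rfl (Prod.ext ?_ rfl)
      push_cast; ring
    · simp only [pvAForStep, hget, pvStep, if_neg hc]
      rw [if_neg (by simp), if_pos (by simp [hc])]
      refine Prod.ext (by simp) (Prod.ext ?_ rfl)
      simp

-- A's for-loop simulates the abstract reversed-stack fold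
theorem pvAFor_sim (l : List Char) : ∀ (rs : List Char) (i : Int),
    l.foldl pvAForStep (rs.reverse, (rs.length : Int) - 1, i)
      = ((List.foldl pvStep rs l).reverse, ((List.foldl pvStep rs l).length : Int) - 1, i + l.length) := by
  induction l with
  | nil => intro rs i; simp
  | cons c l ih =>
    intro rs i
    simp only [List.foldl_cons]
    rw [pvAStep_sim rs i c, ih (pvStep rs c) (i + 1)]
    refine Prod.ext rfl (Prod.ext rfl ?_)
    simp only [List.length_cons]
    push_cast; ring

theorem delete_seq_eq (tx : String) :
    delete_seq tx = ((List.foldl pvStep [] tx.toList).length : Int) := by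
  unfold delete_seq
  match htx : tx.toList with
  | [] => rw [pvAWhile]; simp
  | x :: xs =>
    rw [pvAWhile, dif_pos (by simp)]
    have := pvAFor_sim (x :: xs) [] 0
    simp only [List.reverse_nil, List.length_nil, Nat.cast_zero, zero_add] at this
    rw [show ((0:Int) - 1) = (-1 : Int) by omega] at this
    rw [this]
    rw [pvAWhile, dif_neg (by simp)]
    simp

theorem delete_seq_alt_eq (tx : String) :
    delete_seq_alt tx = ((List.foldl pvStep [] tx.toList).length : Int) := by
  unfold delete_seq_alt
  have h1 : (pvLoop tx.toList).reverse = List.foldl pvStep [] tx.toList := by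
    rw [← pvLoop_fold, pvFold_of_chain _ (pvLoop_chain tx.toList)]
  have : (pvLoop tx.toList).length = (List.foldl pvStep [] tx.toList).length := by
    rw [← h1]; simp
  rw [this]

-- ===== VERDICT (by name: the statement is the Claim_ definition above) =====
theorem delete_seq_spec : Claim_equal_delete_seq := by
  intro tx _
  unfold Spec_delete_seq
  rw [delete_seq_eq, delete_seq_alt_eq]
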